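-- pv_equiv track=rewrite | github.com/aljazvaupotic/AOC | 2023/day6.py | count_optimized
-- ===== SOURCE A (Python) =====
-- def count_optimized(t, d):
--     c = 0
--     for x in range(0, t // 2):
--         time_remaining = t - x
--         speed = x
--         if speed * time_remaining > d:
--             c += 2
--     if t % 2 == 0:
--         c += 1
--     return c
-- ===== SOURCE B (Python) =====
-- def count_optimized(t, d):
--     n = max(t // 2, 0)
--     # binary search the smallest x in [0, n) with x*(t-x) > d (n if none);
--     # x*(t-x) is strictly increasing on [0, n), so the predicate is monotone
--     lo, hi = 0, n
--     while lo < hi: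
--         mid = (lo + hi) // 2
--         if mid * (t - mid) > d:
--             hi = mid
--         else:
--             lo = mid + 1
--     c = 2 * (n - lo)
--     if t % 2 == 0:
--         c += 1
--     return c
-- ===== Notes on version B (the rewrite author's own statement) =====
-- stated objective: faster
-- what changed: B replaces A's linear scan of all t//2 candidate hold times with a binary search for the first x with x*(t-x) > d (the predicate is monotone on [0, t//2)) and counts winners arithmetically.
import Mathlib
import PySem

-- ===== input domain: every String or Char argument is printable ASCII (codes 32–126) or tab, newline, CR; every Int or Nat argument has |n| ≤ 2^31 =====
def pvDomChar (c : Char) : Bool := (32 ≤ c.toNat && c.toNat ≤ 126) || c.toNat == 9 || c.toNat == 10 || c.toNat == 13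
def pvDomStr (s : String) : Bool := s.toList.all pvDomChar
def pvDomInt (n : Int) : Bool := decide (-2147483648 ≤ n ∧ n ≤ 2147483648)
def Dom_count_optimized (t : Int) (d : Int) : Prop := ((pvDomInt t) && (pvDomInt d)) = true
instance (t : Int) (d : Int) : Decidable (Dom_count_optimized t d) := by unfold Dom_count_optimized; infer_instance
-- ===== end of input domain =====

-- B replaces A's linear scan with a binary search for the first winning hold time
-- (the win predicate is monotone on [0, t//2)), counting winners arithmetically.

-- ===== PORT A =====
def count_optimized (t : Int) (d : Int) : Int :=
  let c := (PySem.List.pyRange 0 (PySem.Int.floordiv t 2) 1).foldl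
    (fun c x => if x * (t - x) > d then c + 2 else c) 0
  if PySem.Int.mod t 2 = 0 then c + 1 else c

-- ===== PORT B =====
-- the `while lo < hi` binary-search loop of Source B, as recursion on hi - lo
def bsearch_alt (t : Int) (d : Int) (lo : Int) (hi : Int) : Int :=
  if h : lo < hi then
    -- mid = (lo + hi) // 2, inlined
    if (PySem.Int.floordiv (lo + hi) 2) * (t - PySem.Int.floordiv (lo + hi) 2) > d then
      bsearch_alt t d lo (PySem.Int.floordiv (lo + hi) 2)
    else bsearch_alt t d (PySem.Int.floordiv (lo + hi) 2 + 1) hi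
  else lo
termination_by (hi - lo).toNat
decreasing_by
  · have _h := PySem.Int.floordiv_two_mid_bounds (le_of_lt h)
    have h2 : PySem.Int.floordiv (lo + hi) 2 < hi := by
      rw [PySem.Int.floordiv_lt_iff_lt_mul (by norm_num : (0:Int) < 2)]; omega
    omega
  · have h1 := PySem.Int.floordiv_two_mid_bounds (le_of_lt h)
    omega

def count_optimized_alt (t : Int) (d : Int) : Int :=
  let n := max (PySem.Int.floordiv t 2) 0
  let lo := bsearch_alt t d 0 n
  let c := 2 * (n - lo)
  if PySem.Int.mod t 2 = 0 then c + 1 else c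

-- ===== PRECONDITION & SPEC =====
def Spec_count_optimized (t : Int) (d : Int) (out : Int) : Prop := out = count_optimized_alt t d
instance (t : Int) (d : Int) (out : Int) : Decidable (Spec_count_optimized t d out) := by unfold Spec_count_optimized; infer_instance

-- ===== CLAIM (what is proved, stated in full; the proofs are below) =====
def Claim_equal_count_optimized : Prop := ∀ (t : Int) (d : Int), Dom_count_optimized t d → Spec_count_optimized t d (count_optimized t d)

-- ===== LEMMAS AND PROOFS =====

-- x*(t-x) is monotone in x while 2x + 2 ≤ t
theorem pv_mono {t d x y : Int} (hx : 0 ≤ x) (hxy : x ≤ y) (hy : 2 * y + 2 ≤ t)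
    (h : x * (t - x) > d) : y * (t - y) > d := by nlinarith

-- bsearch_alt returns the least x in [lo, hi) with x*(t-x) > d (hi if none)
theorem bsearch_spec (t d : Int) : ∀ (k : ℕ) (lo hi : Int), (hi - lo).toNat = k →
    0 ≤ lo → lo ≤ hi → 2 * hi ≤ t →
    lo ≤ bsearch_alt t d lo hi ∧ bsearch_alt t d lo hi ≤ hi ∧
    (∀ x, lo ≤ x → x < bsearch_alt t d lo hi → ¬ x * (t - x) > d) ∧
    (bsearch_alt t d lo hi < hi → (bsearch_alt t d lo hi) * (t - bsearch_alt t d lo hi) > d) := by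
  intro k
  induction k using Nat.strong_induction_on with
  | _ k ih =>
    intro lo hi hk hlo hle hhi
    rw [bsearch_alt]
    by_cases h : lo < hi
    · simp only [h, dif_pos]
      have hmid := PySem.Int.floordiv_two_mid_bounds (le_of_lt h)
      have hmid2 : PySem.Int.floordiv (lo + hi) 2 < hi := by
        rw [PySem.Int.floordiv_lt_iff_lt_mul (by norm_num : (0:Int) < 2)]; omega
      by_cases hp : (PySem.Int.floordiv (lo + hi) 2) * (t - PySem.Int.floordiv (lo + hi) 2) > d
      · rw [if_pos hp]
        obtain ⟨h1, h2, h3, h4⟩ :=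
          ih (PySem.Int.floordiv (lo + hi) 2 - lo).toNat (by omega) lo
            (PySem.Int.floordiv (lo + hi) 2) rfl hlo (by omega) (by omega)
        refine ⟨h1, by omega, h3, ?_⟩
        intro hlt
        rcases lt_or_eq_of_le h2 with h' | h'
        · exact h4 h'
        · rw [h']; exact hp
      · rw [if_neg hp]
        obtain ⟨h1, h2, h3, h4⟩ :=
          ih (hi - (PySem.Int.floordiv (lo + hi) 2 + 1)).toNat (by omega)
            (PySem.Int.floordiv (lo + hi) 2 + 1) hi rfl (by omega) (by omega) hhi
        refine ⟨by omega, h2, ?_, h4⟩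
        intro x hx hxr
        by_cases hxm : PySem.Int.floordiv (lo + hi) 2 + 1 ≤ x
        · exact h3 x hxm hxr
        · intro hpx
          exact hp (pv_mono (by omega) (by omega : x ≤ PySem.Int.floordiv (lo + hi) 2) (by omega) hpx)
    · simp only [h, dif_neg, not_false_iff]
      exact ⟨le_refl _, hle, fun x hx hxr => absurd (lt_of_le_of_lt hx hxr) (lt_irrefl _),
        fun hlt => hlt.elim⟩

-- A's counting loop, against the threshold r
theorem loop_count (t d n r : Int) (_hr0 : 0 ≤ r) (hrn : r ≤ n)
    (hbelow : ∀ x, 0 ≤ x → x < r → ¬ x * (t - x) > d)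
    (habove : ∀ x, r ≤ x → x < n → x * (t - x) > d) :
    ∀ (k : ℕ) (lo c : Int), (n - lo).toNat = k → 0 ≤ lo → lo ≤ n →
    (PySem.List.pyRange lo n 1).foldl (fun c x => if x * (t - x) > d then c + 2 else c) c
      = c + 2 * (n - max lo r) := by
  intro k
  induction k with
  | zero =>
    intro lo c hk h0 hln
    have : lo = n := by omega
    subst this
    rw [PySem.List.pyRange_one_eq_nil (le_refl _)]
    simp
    omega
  | succ k ih =>
    intro lo c hk h0 hln
    have hlt : lo < n := by omega
    rw [PySem.List.pyRange_one_cons hlt]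
    simp only [List.foldl_cons]
    by_cases hp : lo * (t - lo) > d
    · rw [if_pos hp]
      have hge : r ≤ lo := by
        by_contra hc
        exact hbelow lo h0 (by omega) hp
      rw [ih (lo + 1) (c + 2) (by omega) (by omega) (by omega)]
      have : max lo r = lo := by omega
      have : max (lo + 1) r = lo + 1 := by omega
      omega
    · rw [if_neg hp]
      have hlr : lo < r := by
        by_contra hc
        exact hp (habove lo (by omega) hlt)
      rw [ih (lo + 1) c (by omega) (by omega) (by omega)]
      have : max lo r = r := by omega
      have : max (lo + 1) r = r := by omega
      omega

-- ===== VERDICT (by name: the statement is the Claim_ definition above) =====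
theorem count_optimized_spec : Claim_equal_count_optimized := by
  intro t d _
  unfold Spec_count_optimized count_optimized count_optimized_alt
  dsimp only
  have key : (PySem.List.pyRange 0 (PySem.Int.floordiv t 2) 1).foldl
      (fun c x => if x * (t - x) > d then c + 2 else c) 0
      = 2 * (max (PySem.Int.floordiv t 2) 0
          - bsearch_alt t d 0 (max (PySem.Int.floordiv t 2) 0)) := by
    by_cases ht : PySem.Int.floordiv t 2 ≤ 0
    · have hn0 : max (PySem.Int.floordiv t 2) 0 = 0 := by omega
      rw [PySem.List.pyRange_one_eq_nil ht, hn0]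
      have hb : bsearch_alt t d 0 0 = 0 := by rw [bsearch_alt]; norm_num
      rw [hb]
      simp
    · rw [not_le] at ht
      have hn' : max (PySem.Int.floordiv t 2) 0 = PySem.Int.floordiv t 2 := by omega
      rw [hn']
      set n := PySem.Int.floordiv t 2 with hn
      have h2 : 2 * n ≤ t := by
        have := PySem.Int.floordiv_eq_ediv_of_pos (a := t) (by norm_num : (0:Int) < 2)
        omega
      obtain ⟨h1, h2', h3, h4⟩ := bsearch_spec t d (n - 0).toNat 0 n rfl (le_refl 0) (by omega) h2
      set r := bsearch_alt t d 0 n with hrdef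
      have habove : ∀ x, r ≤ x → x < n → x * (t - x) > d := by
        intro x hrx hxn
        have hrn : r < n := lt_of_le_of_lt hrx hxn
        exact pv_mono h1 hrx (by omega) (h4 hrn)
      have hloop := loop_count t d n r h1 h2' h3 habove
        (n - 0).toNat 0 0 rfl (le_refl 0) (by omega)
      rw [hloop]
      have hmax : max 0 r = r := by omega
      rw [hmax]
      ring
  rw [key]
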